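-- pv_equiv track=rewrite | github.com/bensiebert/advent_of_code | 2017/day09/day09b.py | calc_garbage
-- ===== SOURCE A (Python) =====
-- def calc_garbage(text):
--     """
--     >>> calc_garbage('<>')
--     0
--     >>> calc_garbage('<random characters>')
--     17
--     >>> calc_garbage('<<<<>')
--     3
--     >>> calc_garbage('<{!>}>')
--     2
--     >>> calc_garbage('<!!>')
--     0
--     >>> calc_garbage('<!!!>>')
--     0
--     >>> calc_garbage('<{o"i!a,<{i<a>')
--     10
--     """
--     ignore = False
--     garbage_mode = False
--
--     garbage = ''
--
--     for c in text:
--         if ignore: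
--             ignore = False
--             continue
--
--         if c == '!':
--             ignore = True
--             continue
--
--         if c == '>':
--             garbage_mode = False
--             continue
--
--         if garbage_mode:
--             garbage += c
--             continue
--
--         if c == '<':
--             garbage_mode = True
--             continue
--
--         if c == '{':
--             continue
--
--         if c == "}":
--             continue
--
--     return len(garbage)
-- ===== SOURCE B (Python) =====
-- def _strip_escapes(text):
--     out = []
--     i = 0
--     n = len(text)
--     while i < n:
--         if text[i] == '!':
--             i += 2  # drop '!' and the following char (or lone trailing '!')
--         else:
--             out.append(text[i])
--             i += 1
--     return out
--
--
-- def calc_garbage(text):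
--     count = 0
--     in_garbage = False
--     for c in _strip_escapes(text):
--         if in_garbage:
--             if c == '>':
--                 in_garbage = False
--             else:
--                 count += 1
--         elif c == '<':
--             in_garbage = True
--     return count
-- ===== Notes on version B (the rewrite author's own statement) =====
-- stated objective: simpler
-- what changed: Replaces A's single interleaved state machine (ignore flag + garbage mode + accumulated garbage string) with a two-pass decomposition: first strip every escape marker together with the character following it, then count garbage characters in the cleaned stream with one flag and an integer counter instead of building a string.
import Mathlib
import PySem

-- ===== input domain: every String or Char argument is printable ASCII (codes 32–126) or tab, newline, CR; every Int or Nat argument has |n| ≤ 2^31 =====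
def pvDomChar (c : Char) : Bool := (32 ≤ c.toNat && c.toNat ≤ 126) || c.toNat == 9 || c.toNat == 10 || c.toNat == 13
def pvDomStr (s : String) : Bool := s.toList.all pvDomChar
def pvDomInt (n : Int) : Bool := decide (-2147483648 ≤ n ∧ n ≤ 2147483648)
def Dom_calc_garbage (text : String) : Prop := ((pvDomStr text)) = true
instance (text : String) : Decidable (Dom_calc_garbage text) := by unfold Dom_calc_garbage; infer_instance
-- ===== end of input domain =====

-- B replaces A's interleaved four-flag state machine by a two-pass decomposition
-- (strip escape sequences, then count with one garbage flag) and keeps a counter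
-- instead of building the garbage string; objective: simpler.

-- ===== PORT A =====
-- A's loop: state (ignore, garbage_mode, garbage string), branches in source order.
def calcGarbageLoopA : List Char → Bool → Bool → List Char → List Char
  | [], _, _, g => g
  | c :: rest, ignore, mode, g =>
    if ignore then calcGarbageLoopA rest false mode g
    else if c = '!' then calcGarbageLoopA rest true mode g
    else if c = '>' then calcGarbageLoopA rest ignore false g
    else if mode then calcGarbageLoopA rest ignore mode (g ++ [c])
    else if c = '<' then calcGarbageLoopA rest ignore true g
    else calcGarbageLoopA rest ignore mode g   -- the '{' / '}' / other branches all just continue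

def calc_garbage (text : String) : Int :=
  ((calcGarbageLoopA text.toList false false []).length : Int)

-- ===== PORT B =====
-- pass 1: drop every '!' together with the single following char (a lone trailing '!' too)
def stripEscapes : List Char → List Char
  | [] => []
  | c :: rest =>
    if c = '!' then
      match rest with
      | [] => []
      | _ :: r => stripEscapes r
    else c :: stripEscapes rest

-- pass 2: count garbage chars with one flag
def countGarbage : List Char → Bool → Int
  | [], _ => 0
  | c :: rest, inG =>
    if inG then
      if c = '>' then countGarbage rest false else countGarbage rest true + 1
    else
      if c = '<' then countGarbage rest true else countGarbage rest false

def calc_garbage_alt (text : String) : Int :=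
  countGarbage (stripEscapes text.toList) false

-- ===== PRECONDITION & SPEC =====
def Spec_calc_garbage (text : String) (out : Int) : Prop := out = calc_garbage_alt text
instance (text : String) (out : Int) : Decidable (Spec_calc_garbage text out) := by unfold Spec_calc_garbage; infer_instance

-- ===== CLAIM (what is proved, stated in full; the proofs are below) =====
def Claim_equal_calc_garbage : Prop := ∀ (text : String), Dom_calc_garbage text → Spec_calc_garbage text (calc_garbage text)

-- ===== LEMMAS AND PROOFS =====
theorem stripEscapes_cons_ne {c : Char} (rest : List Char) (h : ¬ c = '!') :
    stripEscapes (c :: rest) = c :: stripEscapes rest := by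
  rw [stripEscapes.eq_def]
  simp [h]

-- Loop invariant: A's loop (with ignore = false) on cs, mode m, accumulator g
-- returns a string of length |g| + (B's count of the escape-stripped cs with flag m).
theorem loopA_eq_count (n : Nat) : ∀ cs : List Char, cs.length ≤ n → ∀ (m : Bool) (g : List Char),
    ((calcGarbageLoopA cs false m g).length : Int)
      = (g.length : Int) + countGarbage (stripEscapes cs) m := by
  induction n with
  | zero =>
    intro cs h m g
    have : cs = [] := List.eq_nil_of_length_eq_zero (Nat.le_zero.mp h)
    subst this
    simp [calcGarbageLoopA, stripEscapes, countGarbage]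
  | succ n ih =>
    intro cs h m g
    match cs with
    | [] => simp [calcGarbageLoopA, stripEscapes, countGarbage]
    | c :: rest =>
      simp only [List.length_cons, Nat.succ_le_succ_iff] at h
      by_cases hbang : c = '!'
      · subst hbang
        match rest with
        | [] => simp [calcGarbageLoopA, stripEscapes, countGarbage]
        | c' :: r =>
          have hr : r.length ≤ n := by simp at h; omega
          show ((calcGarbageLoopA r false m g).length : Int)
              = (g.length : Int) + countGarbage (stripEscapes (('!' :: c' :: r))) m
          rw [show stripEscapes ('!' :: c' :: r) = stripEscapes r from rfl]
          exact ih r hr m g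
      · rw [stripEscapes_cons_ne rest hbang]
        by_cases hgt : c = '>'
        · subst hgt
          show ((calcGarbageLoopA rest false false g).length : Int)
              = (g.length : Int) + countGarbage ('>' :: stripEscapes rest) m
          cases m <;> simp [ih rest h false g, countGarbage]
        · cases m with
          | true =>
            rw [show calcGarbageLoopA (c :: rest) false true g
                  = calcGarbageLoopA rest false true (g ++ [c]) by
                simp [calcGarbageLoopA, hbang, hgt]]
            rw [ih rest h true (g ++ [c])]
            simp [countGarbage, hgt]
            ring
          | false =>
            by_cases hlt : c = '<'
            · subst hlt
              rw [show calcGarbageLoopA ('<' :: rest) false false g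
                    = calcGarbageLoopA rest false true g by
                  simp [calcGarbageLoopA, hbang, hgt]]
              simp [ih rest h true g, countGarbage]
            · rw [show calcGarbageLoopA (c :: rest) false false g
                    = calcGarbageLoopA rest false false g by
                  simp [calcGarbageLoopA, hbang, hgt, hlt]]
              simp [ih rest h false g, countGarbage, hlt]

-- ===== VERDICT (by name: the statement is the Claim_ definition above) =====
theorem calc_garbage_spec : Claim_equal_calc_garbage := by
  intro text _
  unfold Spec_calc_garbage calc_garbage calc_garbage_alt
  simpa using loopA_eq_count text.toList.length text.toList le_rfl false []
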